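-- pv_equiv track=rewrite | github.com/ykghani/advent-of-code-23 | d11/d11.py | number_galaxies
-- ===== SOURCE A (Python) =====
-- def number_galaxies(grid):
--     gal_coords = dict()
--     height = len(grid)
--     width = len(grid[0])
--
--     counter = 1
--     for i in range(height):
--         row = list(grid[i])
--         for j in range(width):
--             if row[j] == '#':
--                 row[j] = str(counter)
--                 gal_coords[str(counter)] = (i, j)
--                 counter += 1
--
--             grid[i] = ''.join(row)
--
--     return (grid, counter, gal_coords)
-- ===== SOURCE B (Python) =====
-- # Two-phase re-implementation: collect galaxy columns per row, prefix-sum the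
-- # counts, then rewrite each row once (A re-joins the row on every column).
-- # Like A, it mutates the passed-in grid's rows in place.
-- def number_galaxies(grid):
--     width = len(grid[0])
--
--     def galaxy_cols(line):
--         return [j for j in range(width) if line[j] == '#']
--
--     def rewrite(line, cols, start):
--         chars = list(line)
--         for k, j in enumerate(cols):
--             chars[j] = str(start + k)
--         return ''.join(chars)
--
--     cols_per_row = [galaxy_cols(line) for line in grid]
--     starts = [1]
--     for cols in cols_per_row:
--         starts.append(starts[-1] + len(cols))
--     gal_coords = {}
--     for i, cols in enumerate(cols_per_row):
--         grid[i] = rewrite(grid[i], cols, starts[i])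
--         for k, j in enumerate(cols):
--             gal_coords[str(starts[i] + k)] = (i, j)
--     return (grid, starts[-1], gal_coords)
-- ===== Notes on version B (the rewrite author's own statement) =====
-- stated objective: alternative
-- what changed: A threads a running galaxy counter through a nested loop that mutates the row list and re-joins the whole row after every single column; B first collects the galaxy columns of each row, prefix-sums the per-row counts, and then rewrites and joins each row exactly once from those lists.
import Mathlib
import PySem

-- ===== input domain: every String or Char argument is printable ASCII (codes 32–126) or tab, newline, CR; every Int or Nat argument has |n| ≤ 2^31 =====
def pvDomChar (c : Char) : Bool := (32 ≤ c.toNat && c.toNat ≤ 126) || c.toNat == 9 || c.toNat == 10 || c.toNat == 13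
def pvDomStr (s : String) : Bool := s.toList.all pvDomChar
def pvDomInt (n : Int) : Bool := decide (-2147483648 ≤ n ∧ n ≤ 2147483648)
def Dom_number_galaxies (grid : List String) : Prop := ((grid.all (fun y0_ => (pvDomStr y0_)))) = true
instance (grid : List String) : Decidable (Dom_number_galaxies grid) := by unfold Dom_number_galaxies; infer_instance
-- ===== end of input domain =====

-- B replaces A's nested counter-threading loop (which re-joins the row after every
-- column) by: collect galaxy columns per row, prefix-sum the counts, rewrite each
-- row once.  Both A and B mutate the caller's grid rows in place in Python; the
-- equivalence proved here is about the RETURN value (the mutated rows coincide too).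

-- ===== PORT A =====
def number_galaxies (grid : List String) : List String × Int × (List (String × Int × Int)) :=
  let height : Int := grid.length
  let width : Int := ((PySem.List.pyGet? grid 0).getD "").toList.length
  let fin := (PySem.List.pyRange 0 height 1).foldl
    (fun (st : List String × Int × PySem.Dict String (Int × Int)) i =>
      let row0 : List String := ((PySem.List.pyGet? st.1 i).getD "").toList.map (fun c => String.ofList [c])
      let inner := (PySem.List.pyRange 0 width 1).foldl
        (fun (st2 : List String × Int × PySem.Dict String (Int × Int) × List String) j =>
          let st3 :=
            if (PySem.List.pyGet? st2.1 j).getD "" = "#" then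
              (PySem.List.pySetD st2.1 j (PySem.Int.toStr st2.2.1),
               st2.2.1 + 1,
               (st2.2.2.1).insert (PySem.Int.toStr st2.2.1) (i, j),
               st2.2.2.2)
            else st2
          (st3.1, st3.2.1, st3.2.2.1, PySem.List.pySetD st3.2.2.2 i (PySem.Str.join "" st3.1)))
        (row0, st.2.1, st.2.2, st.1)
      (inner.2.2.2, inner.2.1, inner.2.2.1))
    (grid, 1, PySem.Dict.empty)
  (fin.1, fin.2.1, fin.2.2.items)

-- ===== PORT B =====
def number_galaxies_alt (grid : List String) : List String × Int × (List (String × Int × Int)) :=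
  let width : Int := ((PySem.List.pyGet? grid 0).getD "").toList.length
  let galaxy_cols : String → List Int := fun line =>
    (PySem.List.pyRange 0 width 1).filter
      (fun j => (PySem.List.pyGet? line.toList j).getD ' ' == '#')
  let rewrite : String → List Int → Int → String := fun line cols start =>
    let chars := (PySem.List.enumerate cols 0).foldl
      (fun chs kj => PySem.List.pySetD chs kj.2 (PySem.Int.toStr (start + kj.1)))
      (line.toList.map (fun c => String.ofList [c]))
    PySem.Str.join "" chars
  let cols_per_row := grid.map galaxy_cols
  let starts := cols_per_row.foldl
    (fun st cols => st ++ [(PySem.List.pyGet? st (-1)).getD 0 + (cols.length : Int)]) [(1 : Int)]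
  let fin := (PySem.List.enumerate cols_per_row 0).foldl
    (fun (st : List String × PySem.Dict String (Int × Int)) icols =>
      let start := (PySem.List.pyGet? starts icols.1).getD 0
      let g := PySem.List.pySetD st.1 icols.1
        (rewrite ((PySem.List.pyGet? st.1 icols.1).getD "") icols.2 start)
      let d := (PySem.List.enumerate icols.2 0).foldl
        (fun d2 kj => d2.insert (PySem.Int.toStr (start + kj.1)) (icols.1, kj.2)) st.2
      (g, d))
    (grid, PySem.Dict.empty)
  (fin.1, (PySem.List.pyGet? starts (-1)).getD 0, fin.2.items)

-- ===== PRECONDITION & SPEC =====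
-- Pre_ excludes exactly the inputs on which A raises IndexError: the empty grid
-- (grid[0]) and grids with some row shorter than the first row (row[j] with j < width).
def Pre_number_galaxies (grid : List String) : Prop :=
  grid ≠ [] ∧ ∀ s ∈ grid, (grid.headD "").toList.length ≤ s.toList.length
instance (grid : List String) : Decidable (Pre_number_galaxies grid) := by
  unfold Pre_number_galaxies; infer_instance
def pvWitness_number_galaxies : List String := ["#..#", ".#..", "....", "##.#"]
def Spec_number_galaxies (grid : List String) (out : List String × Int × (List (String × Int × Int))) : Prop := out = number_galaxies_alt grid
instance (grid : List String) (out : List String × Int × (List (String × Int × Int))) : Decidable (Spec_number_galaxies grid out) := by unfold Spec_number_galaxies; infer_instance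

-- ===== CLAIM (what is proved, stated in full; the proofs are below) =====
def Claim_equal_number_galaxies : Prop := ∀ (grid : List String), Dom_number_galaxies grid → Pre_number_galaxies grid → Spec_number_galaxies grid (number_galaxies grid)

-- ===== LEMMAS AND PROOFS =====

-- proof-side names for the two ports' loop bodies (definitionally equal to the inline lambdas)
def pvInnerStep (i : Int)
    (st2 : List String × Int × PySem.Dict String (Int × Int) × List String) (j : Int) :
    List String × Int × PySem.Dict String (Int × Int) × List String :=
  let st3 :=
    if (PySem.List.pyGet? st2.1 j).getD "" = "#" then
      (PySem.List.pySetD st2.1 j (PySem.Int.toStr st2.2.1),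
       st2.2.1 + 1,
       (st2.2.2.1).insert (PySem.Int.toStr st2.2.1) (i, j),
       st2.2.2.2)
    else st2
  (st3.1, st3.2.1, st3.2.2.1, PySem.List.pySetD st3.2.2.2 i (PySem.Str.join "" st3.1))

def pvAStep (width : Int)
    (st : List String × Int × PySem.Dict String (Int × Int)) (i : Int) :
    List String × Int × PySem.Dict String (Int × Int) :=
  let row0 : List String := ((PySem.List.pyGet? st.1 i).getD "").toList.map (fun c => String.ofList [c])
  let inner := (PySem.List.pyRange 0 width 1).foldl (pvInnerStep i) (row0, st.2.1, st.2.2, st.1)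
  (inner.2.2.2, inner.2.1, inner.2.2.1)

def pvBStep (starts : List Int)
    (st : List String × PySem.Dict String (Int × Int)) (icols : Int × List Int) :
    List String × PySem.Dict String (Int × Int) :=
  let start := (PySem.List.pyGet? starts icols.1).getD 0
  let g := PySem.List.pySetD st.1 icols.1
    (PySem.Str.join "" ((PySem.List.enumerate icols.2 0).foldl
      (fun chs kj => PySem.List.pySetD chs kj.2 (PySem.Int.toStr (start + kj.1)))
      ((((PySem.List.pyGet? st.1 icols.1).getD "").toList).map (fun c => String.ofList [c]))))
  let d := (PySem.List.enumerate icols.2 0).foldl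
    (fun d2 kj => d2.insert (PySem.Int.toStr (start + kj.1)) (icols.1, kj.2)) st.2
  (g, d)

-- canonical per-row data
def pvBase (s : String) : List String := s.toList.map (fun c => String.ofList [c])

def pvCols (w : Int) (s : String) : List Int :=
  (PySem.List.pyRange 0 w 1).filter (fun j => (PySem.List.pyGet? s.toList j).getD ' ' == '#')

def pvRowChars (w : Int) (s : String) (c : Int) : List String :=
  (PySem.List.enumerate (pvCols w s) 0).foldl
    (fun chs kj => PySem.List.pySetD chs kj.2 (PySem.Int.toStr (c + kj.1))) (pvBase s)

def pvRowStr (w : Int) (s : String) (c : Int) : String := PySem.Str.join "" (pvRowChars w s c)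

def pvIns (w : Int) (s : String) (i c : Int) (d : PySem.Dict String (Int × Int)) :
    PySem.Dict String (Int × Int) :=
  (PySem.List.enumerate (pvCols w s) 0).foldl
    (fun d2 kj => d2.insert (PySem.Int.toStr (c + kj.1)) (i, kj.2)) d

def pvProc (w : Int) : List String → Int → Int → PySem.Dict String (Int × Int) →
    List String × Int × PySem.Dict String (Int × Int)
  | [], _, c, d => ([], c, d)
  | s :: t, i, c, d =>
    let r := pvProc w t (i + 1) (c + ((pvCols w s).length : Int)) (pvIns w s i c d)
    (pvRowStr w s c :: r.1, r.2)

def pvStartsL : List (List Int) → Int → List Int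
  | [], c => [c]
  | l :: L, c => c :: pvStartsL L (c + l.length)

def pvFinal : List (List Int) → Int → Int
  | [], c => c
  | l :: L, c => pvFinal L (c + l.length)

-- small facts
theorem pv_ofList_eq_hash (c : Char) : (String.ofList [c] = "#") ↔ c = '#' := by
  constructor
  · intro h; have := congrArg String.toList h; simpa using this
  · rintro rfl; rfl

theorem pv_join_base (s : String) :
    PySem.Str.join "" (s.toList.map (fun c => String.ofList [c])) = s := by
  have h : (PySem.Str.join "" (s.toList.map (fun c => String.ofList [c]))).toList = s.toList := by
    simp [PySem.Str.toList_join, Function.comp_def, PySem.Chars.join_nil_singletons]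
  exact String.toList_inj.mp h

theorem pv_get_at_len {α : Type} (d0 : α) (p : List α) (x : α) (t : List α) :
    (PySem.List.pyGet? (p ++ x :: t) (p.length : Int)).getD d0 = x := by
  rw [PySem.List.pyGet?_natCast, List.getElem?_append_right (le_refl p.length)]
  simp

theorem pv_set_at_len {α : Type} (p : List α) (x y : α) (t : List α) :
    PySem.List.pySetD (p ++ x :: t) (p.length : Int) y = p ++ y :: t := by
  rw [PySem.List.pySetD_natCast, List.set_append]
  simp

theorem pv_pySetD_pySetD {α : Type} (g : List α) (i : Int) (hi : 0 ≤ i) (x y : α) :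
    PySem.List.pySetD (PySem.List.pySetD g i x) i y = PySem.List.pySetD g i y := by
  rw [PySem.List.pySetD_of_nonneg _ _ hi, PySem.List.pySetD_of_nonneg _ _ hi,
      PySem.List.pySetD_of_nonneg _ _ hi, List.set_set]

theorem pv_enumerate_append_singleton (l : List Int) (x : Int) : ∀ (s : Int),
    PySem.List.enumerate (l ++ [x]) s = PySem.List.enumerate l s ++ [(s + l.length, x)] := by
  induction l with
  | nil => intro s; simp [PySem.List.enumerate_cons, PySem.List.enumerate_nil]
  | cons a l ih =>
      intro s
      have h : (s + 1) + (l.length : Int) = s + ((l.length : Int) + 1) := by ring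
      simp [PySem.List.enumerate_cons, ih, h]

theorem pv_snd_mem_of_mem_enumerate {l : List Int} {kj : Int × Int}
    (h : kj ∈ PySem.List.enumerate l 0) : kj.2 ∈ l := by
  have h2 := PySem.List.map_snd_enumerate l (0 : Int)
  rw [← h2]
  exact List.mem_map_of_mem h

theorem pv_mem_cols {w : Int} {s : String} {j : Int} (h : j ∈ pvCols w s) : 0 ≤ j ∧ j < w := by
  unfold pvCols at h
  have h1 := (List.mem_filter.mp h).1
  rwa [PySem.List.mem_pyRange_one] at h1

theorem pv_foldl_set_get_ne (f : Int × Int → String) (m : Nat) :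
    ∀ (l : List (Int × Int)) (chs : List String), (∀ kj ∈ l, 0 ≤ kj.2 ∧ kj.2 ≠ (m : Int)) →
    (l.foldl (fun chs kj => PySem.List.pySetD chs kj.2 (f kj)) chs)[m]? = chs[m]? := by
  intro l
  induction l with
  | nil => intro chs _; rfl
  | cons kj l ih =>
      intro chs h
      rw [List.foldl_cons, ih _ (fun x hx => h x (List.mem_cons_of_mem _ hx))]
      obtain ⟨h0, hne⟩ := h kj List.mem_cons_self
      rw [PySem.List.pySetD_of_nonneg _ _ h0, List.getElem?_set_ne (by omega)]

theorem pv_cols_succ (w : Nat) (s : String) (hw : w < s.toList.length) :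
    pvCols ((w : Int) + 1) s =
      pvCols (w : Int) s ++ (if s.toList[w] = '#' then [(w : Int)] else []) := by
  unfold pvCols
  rw [PySem.List.pyRange_one_succ_right (Int.natCast_nonneg w), List.filter_append]
  congr 1
  have hg : s.toList[w]?.getD ' ' = s.toList[w] := by
    simp [List.getElem?_eq_getElem hw]
  by_cases hch : s.toList[w] = '#'
  · simp [List.filter, hg, hch]
  · have hb : (s.toList[w] == '#') = false := by simp [hch]
    simp [List.filter, hg, hb]
    exact hch

theorem pv_rowChars_get_high (w : Nat) (s : String) (c : Int) (hw : w < s.toList.length) :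
    (PySem.List.pyGet? (pvRowChars (w : Int) s c) (w : Int)).getD ""
      = String.ofList [s.toList[w]] := by
  rw [PySem.List.pyGet?_natCast]
  unfold pvRowChars
  rw [pv_foldl_set_get_ne (fun kj => PySem.Int.toStr (c + kj.1)) w _ _ ?hmem]
  · simp [pvBase, List.getElem?_eq_getElem hw]
  case hmem =>
    intro kj hkj
    have h2 := pv_mem_cols (pv_snd_mem_of_mem_enumerate hkj)
    exact ⟨h2.1, by omega⟩

theorem pvInnerStep_eval (i : Int) (row : List String) (c : Int)
    (d : PySem.Dict String (Int × Int)) (g : List String) (j : Int) :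
    pvInnerStep i (row, c, d, g) j =
      if (PySem.List.pyGet? row j).getD "" = "#" then
        (PySem.List.pySetD row j (PySem.Int.toStr c), c + 1,
         d.insert (PySem.Int.toStr c) (i, j),
         PySem.List.pySetD g i
           (PySem.Str.join "" (PySem.List.pySetD row j (PySem.Int.toStr c))))
      else (row, c, d, PySem.List.pySetD g i (PySem.Str.join "" row)) := by
  by_cases h : (PySem.List.pyGet? row j).getD "" = "#" <;> simp [pvInnerStep, h]

theorem pvRowStr_zero (s : String) (c : Int) : pvRowStr 0 s c = s := by
  unfold pvRowStr pvRowChars pvCols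
  rw [PySem.List.pyRange_one_eq_nil (le_refl 0)]
  simpa [pvBase] using pv_join_base s

theorem pv_inner (i : Int) (hi : 0 ≤ i) (s : String) (c : Int)
    (d : PySem.Dict String (Int × Int)) (g : List String) :
    ∀ (w : Nat), w ≤ s.toList.length →
    (PySem.List.pyRange 0 (w : Int) 1).foldl (pvInnerStep i) (pvBase s, c, d, g)
    = (pvRowChars (w : Int) s c, c + ((pvCols (w : Int) s).length : Int),
       pvIns (w : Int) s i c d,
       if w = 0 then g else PySem.List.pySetD g i (pvRowStr (w : Int) s c)) := by
  intro w
  induction w with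
  | zero =>
      intro _
      rw [Nat.cast_zero]
      have hc : pvCols (0 : Int) s = [] := by
        unfold pvCols
        rw [PySem.List.pyRange_one_eq_nil (le_refl 0)]
        rfl
      rw [PySem.List.pyRange_one_eq_nil (le_refl 0)]
      simp [pvRowChars, pvIns, hc, PySem.List.enumerate_nil]
  | succ w ih =>
      intro hw1
      have hw : w < s.toList.length := by omega
      have hcast : (((w + 1 : Nat)) : Int) = (w : Int) + 1 := by push_cast; ring
      rw [hcast, PySem.List.pyRange_one_succ_right (Int.natCast_nonneg w), List.foldl_append,
          ih (by omega)]
      have hget := pv_rowChars_get_high w s c hw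
      have hcols := pv_cols_succ w s hw
      rw [List.foldl_cons, List.foldl_nil, pvInnerStep_eval, hget]
      by_cases hch : s.toList[w] = '#'
      · rw [if_pos hch] at hcols
        rw [if_pos ((pv_ofList_eq_hash _).mpr hch)]
        have hrow : pvRowChars ((w : Int) + 1) s c
            = PySem.List.pySetD (pvRowChars (w : Int) s c) (w : Int)
                (PySem.Int.toStr (c + ((pvCols (w : Int) s).length : Int))) := by
          unfold pvRowChars
          rw [hcols, pv_enumerate_append_singleton, List.foldl_append]
          simp
        have hins : pvIns ((w : Int) + 1) s i c d
            = (pvIns (w : Int) s i c d).insert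
                (PySem.Int.toStr (c + ((pvCols (w : Int) s).length : Int))) (i, (w : Int)) := by
          unfold pvIns
          rw [hcols, pv_enumerate_append_singleton, List.foldl_append]
          simp
        have hrs : PySem.Str.join "" (PySem.List.pySetD (pvRowChars (w : Int) s c) (w : Int)
                (PySem.Int.toStr (c + ((pvCols (w : Int) s).length : Int))))
            = pvRowStr ((w : Int) + 1) s c := by
          rw [pvRowStr, hrow]
        simp only [Prod.mk.injEq]
        refine ⟨hrow.symm, ?_, hins.symm, ?_⟩
        · rw [hcols]
          simp only [List.length_append, List.length_cons, List.length_nil]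
          push_cast; ring
        · rw [if_neg (Nat.succ_ne_zero w), hrs]
          by_cases h0 : w = 0
          · subst h0; simp
          · rw [if_neg h0, pv_pySetD_pySetD g i hi]
      · rw [if_neg hch] at hcols
        rw [List.append_nil] at hcols
        rw [if_neg (by rw [pv_ofList_eq_hash]; exact hch)]
        have hrc : pvRowChars ((w : Int) + 1) s c = pvRowChars (w : Int) s c := by
          unfold pvRowChars; rw [hcols]
        have hins : pvIns ((w : Int) + 1) s i c d = pvIns (w : Int) s i c d := by
          unfold pvIns; rw [hcols]
        have hrs : pvRowStr ((w : Int) + 1) s c = pvRowStr (w : Int) s c := by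
          unfold pvRowStr; rw [hrc]
        simp only [Prod.mk.injEq]
        refine ⟨hrc.symm, ?_, hins.symm, ?_⟩
        · rw [hcols]
        · rw [if_neg (Nat.succ_ne_zero w), hrs,
              show PySem.Str.join "" (pvRowChars (w : Int) s c) = pvRowStr (w : Int) s c from rfl]
          by_cases h0 : w = 0
          · subst h0; simp
          · rw [if_neg h0, pv_pySetD_pySetD g i hi]

theorem pv_outerA (w : Nat) :
    ∀ (t p : List String) (c : Int) (d : PySem.Dict String (Int × Int)),
    (∀ s ∈ t, w ≤ s.toList.length) →
    (PySem.List.pyRange (p.length : Int) ((p.length : Int) + (t.length : Int)) 1).foldl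
        (pvAStep (w : Int)) (p ++ t, c, d)
    = (p ++ (pvProc (w : Int) t (p.length : Int) c d).1,
       (pvProc (w : Int) t (p.length : Int) c d).2) := by
  intro t
  induction t with
  | nil =>
      intro p c d _
      have h0 : ((p.length : Int) + ((([] : List String)).length : Int)) ≤ (p.length : Int) := by
        simp
      rw [PySem.List.pyRange_one_eq_nil h0]
      simp [pvProc]
  | cons s t ih =>
      intro p c d h
      have hlt : (p.length : Int) < (p.length : Int) + (((s :: t)).length : Int) := by
        rw [List.length_cons]; push_cast; omega
      rw [PySem.List.pyRange_one_cons hlt, List.foldl_cons]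
      have hstep : pvAStep (w : Int) (p ++ s :: t, c, d) (p.length : Int)
          = (p ++ pvRowStr (w : Int) s c :: t,
             c + ((pvCols (w : Int) s).length : Int),
             pvIns (w : Int) s (p.length : Int) c d) := by
        have hrow : ((PySem.List.pyGet? (p ++ s :: t) (p.length : Int)).getD "") = s :=
          pv_get_at_len "" p s t
        simp only [pvAStep, hrow]
        rw [show List.map (fun c => String.ofList [c]) s.toList = pvBase s from rfl]
        rw [pv_inner (p.length : Int) (Int.natCast_nonneg p.length) s c d (p ++ s :: t) w
            (h s List.mem_cons_self)]
        by_cases h0 : w = 0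
        · subst h0
          simp [pvRowStr_zero]
        · rw [if_neg h0, pv_set_at_len]
      rw [hstep]
      have e1 : (p.length : Int) + 1 = (((p ++ [pvRowStr (w : Int) s c]).length : Nat) : Int) := by
        push_cast [List.length_append, List.length_cons, List.length_nil]; ring
      have e2 : (p.length : Int) + (((s :: t)).length : Int)
          = (((p ++ [pvRowStr (w : Int) s c]).length : Nat) : Int) + ((t.length : Nat) : Int) := by
        push_cast [List.length_append, List.length_cons, List.length_nil]; ring
      have hpt : p ++ pvRowStr (w : Int) s c :: t
          = (p ++ [pvRowStr (w : Int) s c]) ++ t := by simp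
      rw [e1, e2, hpt, ih (p ++ [pvRowStr (w : Int) s c])
            (c + ((pvCols (w : Int) s).length : Int)) (pvIns (w : Int) s (p.length : Int) c d)
            (fun x hx => h x (List.mem_cons_of_mem _ hx))]
      have hlen1 : (((p ++ [pvRowStr (w : Int) s c]).length : Nat) : Int) = (p.length : Int) + 1 := by
        simp
      rw [hlen1]
      simp [pvProc]

theorem pv_starts (L : List (List Int)) :
    ∀ (a : List Int) (c : Int),
    L.foldl (fun st cols => st ++ [(PySem.List.pyGet? st (-1)).getD 0 + (cols.length : Int)]) (a ++ [c])
    = a ++ pvStartsL L c := by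
  induction L with
  | nil => intro a c; simp [pvStartsL]
  | cons l L ih =>
      intro a c
      rw [List.foldl_cons]
      simp only [PySem.List.pyGet?_neg_one_append_singleton, Option.getD_some]
      rw [ih (a ++ [c]) (c + (l.length : Int))]
      simp [pvStartsL]

theorem pv_starts_last (L : List (List Int)) :
    ∀ (a : List Int) (c : Int),
    (PySem.List.pyGet? (a ++ pvStartsL L c) (-1)).getD 0 = pvFinal L c := by
  induction L with
  | nil =>
      intro a c
      simp [pvStartsL, pvFinal, PySem.List.pyGet?_neg_one_append_singleton]
  | cons l L ih =>
      intro a c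
      have h : a ++ pvStartsL (l :: L) c
          = (a ++ [c]) ++ pvStartsL L (c + (l.length : Int)) := by
        simp [pvStartsL]
      rw [h, ih]
      simp [pvFinal]

theorem pv_proc_counter (w : Int) :
    ∀ (t : List String) (i c : Int) (d : PySem.Dict String (Int × Int)),
    (pvProc w t i c d).2.1 = pvFinal (t.map (pvCols w)) c := by
  intro t
  induction t with
  | nil => intro i c d; simp [pvProc, pvFinal]
  | cons s t ih => intro i c d; simp [pvProc, pvFinal, ih]

theorem pv_outerB (w : Nat) (S : List Int) :
    ∀ (t p : List String) (a : List Int) (c : Int) (d : PySem.Dict String (Int × Int)),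
    (∀ s ∈ t, w ≤ s.toList.length) → a.length = p.length →
    S = a ++ pvStartsL (t.map (pvCols (w : Int))) c →
    (PySem.List.enumerate (t.map (pvCols (w : Int))) (p.length : Int)).foldl (pvBStep S) (p ++ t, d)
    = (p ++ (pvProc (w : Int) t (p.length : Int) c d).1,
       (pvProc (w : Int) t (p.length : Int) c d).2.2) := by
  intro t
  induction t with
  | nil =>
      intro p a c d _ _ _
      simp [pvProc, PySem.List.enumerate_nil]
  | cons s t ih =>
      intro p a c d h hlen hS
      rw [List.map_cons, PySem.List.enumerate_cons, List.foldl_cons]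
      have hstart : (PySem.List.pyGet? S (p.length : Int)).getD 0 = c := by
        rw [hS, ← hlen, List.map_cons,
            show pvStartsL (pvCols (w : Int) s :: List.map (pvCols (w : Int)) t) c
              = c :: pvStartsL (List.map (pvCols (w : Int)) t)
                  (c + ((pvCols (w : Int) s).length : Int)) from rfl]
        exact pv_get_at_len 0 a c _
      have hrow : ((PySem.List.pyGet? (p ++ s :: t) (p.length : Int)).getD "") = s :=
        pv_get_at_len "" p s t
      have hstep : pvBStep S (p ++ s :: t, d) ((p.length : Int), pvCols (w : Int) s)
          = (p ++ pvRowStr (w : Int) s c :: t, pvIns (w : Int) s (p.length : Int) c d) := by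
        simp only [pvBStep, hstart, hrow]
        rw [show (PySem.Str.join "" ((PySem.List.enumerate (pvCols (w : Int) s) 0).foldl
              (fun chs kj => PySem.List.pySetD chs kj.2 (PySem.Int.toStr (c + kj.1)))
              (s.toList.map (fun c => String.ofList [c])))) = pvRowStr (w : Int) s c from rfl,
            pv_set_at_len]
        rfl
      rw [hstep]
      have hpt : p ++ pvRowStr (w : Int) s c :: t
          = (p ++ [pvRowStr (w : Int) s c]) ++ t := by simp
      have hlen1 : ((p ++ [pvRowStr (w : Int) s c]).length : Int) = (p.length : Int) + 1 := by
        simp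
      rw [hpt, show ((p.length : Int) + 1) = (((p ++ [pvRowStr (w : Int) s c]).length : Nat) : Int) from hlen1.symm,
          ih (p ++ [pvRowStr (w : Int) s c]) (a ++ [c])
            (c + ((pvCols (w : Int) s).length : Int)) (pvIns (w : Int) s (p.length : Int) c d)
            (fun x hx => h x (List.mem_cons_of_mem _ hx))
            (by simp [hlen])
            (by rw [hS]; simp [pvStartsL])]
      rw [hlen1]
      simp [pvProc]

-- the two ports, seen through the proof-side step names (definitional)
def pvARun (grid : List String) : List String × Int × (List (String × Int × Int)) :=
  let fin := (PySem.List.pyRange 0 (grid.length : Int) 1).foldl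
    (pvAStep (((PySem.List.pyGet? grid 0).getD "").toList.length : Int))
    (grid, 1, PySem.Dict.empty)
  (fin.1, fin.2.1, fin.2.2.items)

def pvBRun (grid : List String) : List String × Int × (List (String × Int × Int)) :=
  let width : Int := ((PySem.List.pyGet? grid 0).getD "").toList.length
  let cols_per_row := grid.map (pvCols width)
  let starts := cols_per_row.foldl
    (fun st cols => st ++ [(PySem.List.pyGet? st (-1)).getD 0 + (cols.length : Int)]) [(1 : Int)]
  let fin := (PySem.List.enumerate cols_per_row 0).foldl (pvBStep starts) (grid, PySem.Dict.empty)
  (fin.1, (PySem.List.pyGet? starts (-1)).getD 0, fin.2.items)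

theorem pvARun_eq (grid : List String) : number_galaxies grid = pvARun grid := rfl

theorem pvBRun_eq (grid : List String) : number_galaxies_alt grid = pvBRun grid := rfl

theorem pv_width_cons (s0 : String) (rest : List String) :
    ((PySem.List.pyGet? (s0 :: rest) 0).getD "").toList.length = s0.toList.length := by
  rw [show (0 : Int) = ((0 : Nat) : Int) from rfl, PySem.List.pyGet?_natCast]
  rfl

-- ===== VERDICT (by name: the statement is the Claim_ definition above) =====
theorem number_galaxies_spec : Claim_equal_number_galaxies := by
  intro grid _hdom hpre
  unfold Spec_number_galaxies
  obtain ⟨hne, hall0⟩ := hpre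
  cases grid with
  | nil => exact absurd rfl hne
  | cons s0 rest =>
      have hall : ∀ s ∈ (s0 :: rest), s0.toList.length ≤ s.toList.length := by
        intro s hs; simpa using hall0 s hs
      set W : Nat := s0.toList.length with hW
      -- A side
      have hA : number_galaxies (s0 :: rest)
          = ((pvProc (W : Int) (s0 :: rest) 0 1 PySem.Dict.empty).1,
             (pvProc (W : Int) (s0 :: rest) 0 1 PySem.Dict.empty).2.1,
             (pvProc (W : Int) (s0 :: rest) 0 1 PySem.Dict.empty).2.2.items) := by
        rw [pvARun_eq]
        simp only [pvARun, pv_width_cons]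
        have h := pv_outerA W (s0 :: rest) [] 1 PySem.Dict.empty hall
        simp only [List.nil_append, List.length_nil, Nat.cast_zero, zero_add] at h
        rw [h]
      -- B side
      have hB : number_galaxies_alt (s0 :: rest)
          = ((pvProc (W : Int) (s0 :: rest) 0 1 PySem.Dict.empty).1,
             (pvProc (W : Int) (s0 :: rest) 0 1 PySem.Dict.empty).2.1,
             (pvProc (W : Int) (s0 :: rest) 0 1 PySem.Dict.empty).2.2.items) := by
        rw [pvBRun_eq]
        simp only [pvBRun, pv_width_cons]
        have hs := pv_starts ((s0 :: rest).map (pvCols (W : Int))) [] 1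
        simp only [List.nil_append] at hs
        rw [hs]
        have hlast := pv_starts_last ((s0 :: rest).map (pvCols (W : Int))) [] 1
        simp only [List.nil_append] at hlast
        rw [hlast]
        have h := pv_outerB W (pvStartsL ((s0 :: rest).map (pvCols (W : Int))) 1)
          (s0 :: rest) [] [] 1 PySem.Dict.empty hall rfl (by simp)
        simp only [List.nil_append, List.length_nil, Nat.cast_zero] at h
        rw [h, pv_proc_counter]
      rw [hA, hB]
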